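-- pv_equiv track=rewrite | github.com/ogawde/chef-ai-gen | backend/services/content_validator.py | validate_ingredients
-- ===== SOURCE A (Python) =====
-- from typing import List, Tuple, Optional
--
-- BLOCKED_TERMS = [
--     'human head', 'human', 'head', 'brain', 'heart', 'liver', 'kidney', 'organ',
--     'body part', 'limb', 'flesh', 'corpse', 'cadaver',
--     'poison', 'toxic', 'chemical', 'bleach', 'detergent', 'soap', 'paint',
--     'gasoline', 'fuel', 'alcohol', 'drug', 'medicine', 'pill', 'tablet',
--     'plastic', 'metal', 'glass', 'wood', 'stone', 'rock', 'dirt', 'soil',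
--     'grass',
--     'paper', 'fabric', 'cloth', 'rubber', 'leather',
--     'cannabis', 'marijuana', 'cocaine', 'heroin', 'meth', 'lsd',
--     'feces', 'urine', 'blood', 'vomit', 'excrement',
--     'knife', 'weapon', 'gun', 'bullet', 'explosive',
--     'dog', 'cat', 'hamster', 'rabbit', 'bird', 'parrot', 'canary',
--     'dolphin', 'whale', 'seal', 'penguin', 'elephant', 'tiger', 'lion',
--     'insect', 'bug', 'worm', 'spider', 'roach', 'rat', 'mouse',
-- ]
--
-- def validate_ingredients(ingredients: List[str]) -> Tuple[bool, Optional[str]]: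
--     if not ingredients or len(ingredients) == 0:
--         return False, "At least one ingredient is required"
--
--     normalized_text = " ".join(ing.lower().strip() for ing in ingredients)
--
--     for term in BLOCKED_TERMS:
--         if term.lower() in normalized_text:
--             return False, "Invalid ingredient detected. Please use only food ingredients."
--
--     return True, None
-- ===== SOURCE B (Python) =====
-- from typing import List, Tuple, Optional
--
-- BLOCKED_TERMS = [
--     'human head', 'human', 'head', 'brain', 'heart', 'liver', 'kidney', 'organ',
--     'body part', 'limb', 'flesh', 'corpse', 'cadaver',
--     'poison', 'toxic', 'chemical', 'bleach', 'detergent', 'soap', 'paint',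
--     'gasoline', 'fuel', 'alcohol', 'drug', 'medicine', 'pill', 'tablet',
--     'plastic', 'metal', 'glass', 'wood', 'stone', 'rock', 'dirt', 'soil',
--     'grass',
--     'paper', 'fabric', 'cloth', 'rubber', 'leather',
--     'cannabis', 'marijuana', 'cocaine', 'heroin', 'meth', 'lsd',
--     'feces', 'urine', 'blood', 'vomit', 'excrement',
--     'knife', 'weapon', 'gun', 'bullet', 'explosive',
--     'dog', 'cat', 'hamster', 'rabbit', 'bird', 'parrot', 'canary',
--     'dolphin', 'whale', 'seal', 'penguin', 'elephant', 'tiger', 'lion',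
--     'insect', 'bug', 'worm', 'spider', 'roach', 'rat', 'mouse',
-- ]
--
-- # Terms bucketed by their first character: one pass over the text, at each
-- # position only the terms starting with that character are tried.
-- _BY_FIRST = {}
-- for _t in BLOCKED_TERMS:
--     _BY_FIRST[_t[0]] = _BY_FIRST.get(_t[0], []) + [_t]
--
--
-- def validate_ingredients(ingredients: List[str]) -> Tuple[bool, Optional[str]]:
--     if not ingredients:
--         return False, "At least one ingredient is required"
--
--     normalized_text = " ".join(ing.lower().strip() for ing in ingredients)
--
--     for i, ch in enumerate(normalized_text):
--         for term in _BY_FIRST.get(ch, ()):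
--             if normalized_text.startswith(term, i):
--                 return False, "Invalid ingredient detected. Please use only food ingredients."
--
--     return True, None
-- ===== Notes on version B (the rewrite author's own statement) =====
-- stated objective: alternative
-- what changed: Instead of scanning the normalized text once per blocked term (73 substring searches), B buckets the blocked terms by first character once at module load and makes a single left-to-right pass over the text, trying only the terms whose first character matches the current position.
import Mathlib
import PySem

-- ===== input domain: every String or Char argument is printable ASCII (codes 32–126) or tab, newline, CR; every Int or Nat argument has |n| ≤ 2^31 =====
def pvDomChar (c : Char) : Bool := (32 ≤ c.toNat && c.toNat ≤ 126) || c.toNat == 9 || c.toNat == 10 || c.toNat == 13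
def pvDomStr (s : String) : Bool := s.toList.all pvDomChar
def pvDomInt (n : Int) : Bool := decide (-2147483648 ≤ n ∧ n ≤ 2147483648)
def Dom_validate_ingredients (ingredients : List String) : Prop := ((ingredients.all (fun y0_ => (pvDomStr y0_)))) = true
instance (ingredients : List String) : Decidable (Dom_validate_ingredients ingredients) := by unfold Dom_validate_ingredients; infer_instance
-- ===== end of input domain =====

-- B replaces A's 73 per-term substring scans with ONE left-to-right pass over the text,
-- consulting a first-character bucket table at each position (objective: alternative).

-- ===== PORT A =====
def BLOCKED_TERMS : List String := [
  "human head", "human", "head", "brain", "heart", "liver", "kidney", "organ",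
  "body part", "limb", "flesh", "corpse", "cadaver",
  "poison", "toxic", "chemical", "bleach", "detergent", "soap", "paint",
  "gasoline", "fuel", "alcohol", "drug", "medicine", "pill", "tablet",
  "plastic", "metal", "glass", "wood", "stone", "rock", "dirt", "soil",
  "grass",
  "paper", "fabric", "cloth", "rubber", "leather",
  "cannabis", "marijuana", "cocaine", "heroin", "meth", "lsd",
  "feces", "urine", "blood", "vomit", "excrement",
  "knife", "weapon", "gun", "bullet", "explosive",
  "dog", "cat", "hamster", "rabbit", "bird", "parrot", "canary",
  "dolphin", "whale", "seal", "penguin", "elephant", "tiger", "lion",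
  "insect", "bug", "worm", "spider", "roach", "rat", "mouse"]

-- A's for-loop: first blocked term found returns the error tuple.
def loopA : List String → String → Bool × Option String
  | [], _ => (true, none)
  | term :: rest, text =>
    if PySem.Str.isIn (PySem.Str.lower term) text then
      (false, some "Invalid ingredient detected. Please use only food ingredients.")
    else loopA rest text

def validate_ingredients (ingredients : List String) : Bool × Option String :=
  if ingredients = [] then (false, some "At least one ingredient is required")
  else
    let normalized_text :=
      PySem.Str.join " " (ingredients.map (fun ing => PySem.Str.strip (PySem.Str.lower ing)))
    loopA BLOCKED_TERMS normalized_text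

-- ===== PORT B =====
-- _BY_FIRST: blocked terms bucketed by their first character (Source B's module-level loop);
-- `t[0]` is PySem.Str.pyGet? t 0 (the none branch is unreachable: every term is nonempty).
def byFirst : PySem.Dict Char (List String) :=
  BLOCKED_TERMS.foldl
    (fun d t =>
      match PySem.Str.pyGet? t 0 with
      | some c => d.insert c (d.getD c [] ++ [t])
      | none => d)
    PySem.Dict.empty

-- Source B's scan `for i, ch in enumerate(text): for term in _BY_FIRST.get(ch, ()): if text.startswith(term, i)`:
-- recursion over suffixes; `text.startswith(term, i)` is startswith on the suffix text[i:].
def scanAlt : List Char → Bool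
  | [] => false
  | c :: rest =>
    (PySem.Dict.getD byFirst c []).any (fun t => PySem.Chars.startswith (c :: rest) t.toList)
      || scanAlt rest

def validate_ingredients_alt (ingredients : List String) : Bool × Option String :=
  if ingredients = [] then (false, some "At least one ingredient is required")
  else
    let normalized_text :=
      PySem.Str.join " " (ingredients.map (fun ing => PySem.Str.strip (PySem.Str.lower ing)))
    if scanAlt normalized_text.toList then
      (false, some "Invalid ingredient detected. Please use only food ingredients.")
    else (true, none)

-- ===== PRECONDITION & SPEC =====
def Spec_validate_ingredients (ingredients : List String) (out : Bool × Option String) : Prop := out = validate_ingredients_alt ingredients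
instance (ingredients : List String) (out : Bool × Option String) : Decidable (Spec_validate_ingredients ingredients out) := by unfold Spec_validate_ingredients; infer_instance

-- ===== CLAIM (what is proved, stated in full; the proofs are below) =====
def Claim_equal_validate_ingredients : Prop := ∀ (ingredients : List String), Dom_validate_ingredients ingredients → Spec_validate_ingredients ingredients (validate_ingredients ingredients)

-- ===== LEMMAS AND PROOFS =====

-- every bucket entry of byFirst is a blocked term starting with the bucket's key
set_option maxRecDepth 8192 in
theorem byFirst_sound :
    (byFirst.items.all (fun p => p.2.all
      (fun t => BLOCKED_TERMS.contains t && t.toList.head? == some p.1))) = true := by decide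

-- every blocked term is nonempty and sits in the bucket of its first character
set_option maxRecDepth 8192 in
theorem byFirst_complete :
    (BLOCKED_TERMS.all (fun t =>
      match t.toList with
      | [] => false
      | c :: _ => (PySem.Dict.getD byFirst c []).contains t)) = true := by decide

set_option maxRecDepth 8192 in
theorem blocked_lower :
    (BLOCKED_TERMS.all (fun t => PySem.Str.lower t == t)) = true := by decide

theorem loopA_eq (l : List String) (text : String) :
    loopA l text =
      if l.any (fun t => PySem.Str.isIn (PySem.Str.lower t) text) then
        (false, some "Invalid ingredient detected. Please use only food ingredients.")
      else (true, none) := by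
  induction l with
  | nil => simp [loopA]
  | cons t rest ih =>
    simp only [loopA, List.any_cons, Bool.or_eq_true]
    split_ifs with h1 h2 h2 <;> simp_all

theorem scanAlt_iff (cs : List Char) :
    scanAlt cs = true ↔ ∃ t ∈ BLOCKED_TERMS, t.toList <:+: cs := by
  induction cs with
  | nil =>
    simp only [scanAlt, Bool.false_eq_true, false_iff]
    rintro ⟨t, ht, hinf⟩
    have hne : t.toList ≠ [] := by
      have := List.all_eq_true.mp byFirst_complete t ht
      intro h; rw [h] at this; simp at this
    exact hne (List.eq_nil_of_infix_nil hinf)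
  | cons c rest ih =>
    simp only [scanAlt, Bool.or_eq_true, List.any_eq_true, ih]
    constructor
    · rintro (⟨t, htb, hsw⟩ | ⟨t, ht, hinf⟩)
      · -- t comes from the bucket of c: it is a blocked term prefixing c :: rest
        cases hg : PySem.Dict.get? byFirst c with
        | none => rw [PySem.Dict.getD, hg] at htb; simp at htb
        | some l =>
          have htl : t ∈ l := by rwa [PySem.Dict.getD, hg] at htb
          have hmem := PySem.Dict.mem_items_of_get?_eq_some byFirst hg
          have h1 := List.all_eq_true.mp byFirst_sound _ hmem
          have h2 := List.all_eq_true.mp h1 t htl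
          simp only [Bool.and_eq_true, List.contains_eq_mem, decide_eq_true_eq] at h2
          exact ⟨t, h2.1, ((PySem.Chars.startswith_iff _ _).mp hsw).isInfix⟩
      · exact ⟨t, ht, List.infix_cons hinf⟩
    · rintro ⟨t, ht, hinf⟩
      rcases (List.infix_cons_iff).mp hinf with hpre | hinf'
      · left
        have hc := List.all_eq_true.mp byFirst_complete t ht
        cases htl : t.toList with
        | nil => rw [htl] at hc; simp at hc
        | cons th tt =>
          have hhead : th = c := by
            rw [htl] at hpre
            rcases hpre with ⟨s, hs⟩
            injection hs
          rw [htl, hhead] at hc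
          simp only [List.contains_eq_mem, decide_eq_true_eq] at hc
          exact ⟨t, hc, (PySem.Chars.startswith_iff _ _).mpr hpre⟩
      · exact Or.inr ⟨t, ht, hinf'⟩

-- ===== VERDICT (by name: the statement is the Claim_ definition above) =====
theorem validate_ingredients_spec : Claim_equal_validate_ingredients := by
  intro ingredients _
  unfold Spec_validate_ingredients validate_ingredients validate_ingredients_alt
  by_cases hnil : ingredients = []
  · rw [if_pos hnil, if_pos hnil]
  · rw [if_neg hnil, if_neg hnil]
    simp only []
    rw [loopA_eq]
    set text := PySem.Str.join " " (ingredients.map (fun ing => PySem.Str.strip (PySem.Str.lower ing))) with htext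
    have hlower : (BLOCKED_TERMS.any fun t => PySem.Str.isIn (PySem.Str.lower t) text)
        = (BLOCKED_TERMS.any fun t => PySem.Str.isIn t text) := by
      apply PySem.List.any_congr_mem
      intro t ht
      have := List.all_eq_true.mp blocked_lower t ht
      simp only [beq_iff_eq] at this
      rw [this]
    rw [hlower]
    have : (BLOCKED_TERMS.any fun t => PySem.Str.isIn t text) = scanAlt text.toList := by
      rw [Bool.eq_iff_iff, scanAlt_iff]
      simp only [List.any_eq_true]
      constructor <;> rintro ⟨t, ht, h2⟩
      · exact ⟨t, ht, (PySem.Str.isIn_iff_infix _ _).mp h2⟩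
      · exact ⟨t, ht, (PySem.Str.isIn_iff_infix _ _).mpr h2⟩
    rw [this]
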